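-- pv_equiv track=rewrite | github.com/MangelRyujin/Test | my_app/api/team/process.py | repeat_request
-- ===== SOURCE A (Python) =====
-- def repeat_request(selection):
--     request = []
--     for select in selection:
--         position = Reapet(select.get('position'),select.get('mainSkill'))
--         if in_request(request,select) ==0:
--             return False
--         request.append(position)
--     return True
--
-- def in_request(request,selection):
--     for select in request:
--         if select.position == selection.get('position') and select.mainSkill == selection.get('mainSkill') :
--             return 0
--     return 1
--
-- class Reapet():
--
--     def __init__(self,position,mainSkill) -> None:
--         self.position = position
--         self.mainSkill = mainSkill
--
--     def __str__(self) -> str: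
--         return f'{self.position} {self.mainSkill}'
-- ===== SOURCE B (Python) =====
-- def repeat_request(selection):
--     pairs = [(s.get('position'), s.get('mainSkill')) for s in selection]
--     return len(set(pairs)) == len(pairs)
-- ===== Notes on version B (the rewrite author's own statement) =====
-- stated objective: simpler
-- what changed: Replaces A's early-exit loop with a per-element nested scan of an accumulated list of Reapet objects by building the list of (position, mainSkill) pairs once and comparing len(set(pairs)) with len(pairs).
import Mathlib
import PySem

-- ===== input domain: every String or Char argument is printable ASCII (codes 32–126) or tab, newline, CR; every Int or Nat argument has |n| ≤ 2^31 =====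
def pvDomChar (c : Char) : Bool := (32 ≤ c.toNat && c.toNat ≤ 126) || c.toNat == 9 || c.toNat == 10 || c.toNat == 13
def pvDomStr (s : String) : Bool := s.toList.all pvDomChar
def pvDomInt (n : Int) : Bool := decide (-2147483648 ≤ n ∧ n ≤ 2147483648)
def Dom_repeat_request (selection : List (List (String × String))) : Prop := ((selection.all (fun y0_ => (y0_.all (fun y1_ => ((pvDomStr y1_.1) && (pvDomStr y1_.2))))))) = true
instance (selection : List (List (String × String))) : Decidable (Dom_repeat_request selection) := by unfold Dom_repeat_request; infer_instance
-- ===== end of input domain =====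

-- B replaces A's early-exit loop with a nested membership scan (via the Reapet wrapper)
-- by building the list of (position, mainSkill) pairs once and comparing len(set(pairs))
-- with len(pairs); objective: simpler.

-- ===== PORT A =====
-- select.get(k) on a dict
def pvGetA (sel : List (String × String)) (k : String) : Option String :=
  (PySem.Dict.mk sel).get? k

-- Reapet(select.get('position'), select.get('mainSkill')): the object carries exactly
-- this pair of fields, so it is ported as the pair
def pvReapet (select : List (String × String)) : Option String × Option String :=
  (pvGetA select "position", pvGetA select "mainSkill")

-- helper in_request(request, selection)
def pvInRequest (request : List (Option String × Option String))
    (selection : List (String × String)) : Int :=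
  match request with
  | [] => 1
  | select :: rest =>
      if select.1 == pvGetA selection "position" && select.2 == pvGetA selection "mainSkill" then 0
      else pvInRequest rest selection

-- the 'for select in selection' loop of A, with the accumulating 'request' list
def pvLoopA (request : List (Option String × Option String))
    (selection : List (List (String × String))) : Bool :=
  match selection with
  | [] => true
  | select :: rest =>
      let position := pvReapet select
      if pvInRequest request select == 0 then false
      else pvLoopA (request ++ [position]) rest

def repeat_request (selection : List (List (String × String))) : Bool :=
  pvLoopA [] selection

-- ===== PORT B =====
def repeat_request_alt (selection : List (List (String × String))) : Bool :=
  let pairs := selection.map (fun s =>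
    ((PySem.Dict.mk s).get? "position", (PySem.Dict.mk s).get? "mainSkill"))
  (PySem.Set.ofList pairs).length == pairs.length

-- ===== PRECONDITION & SPEC =====
def Spec_repeat_request (selection : List (List (String × String))) (out : Bool) : Prop := out = repeat_request_alt selection
instance (selection : List (List (String × String))) (out : Bool) : Decidable (Spec_repeat_request selection out) := by unfold Spec_repeat_request; infer_instance

-- ===== CLAIM (what is proved, stated in full; the proofs are below) =====
def Claim_equal_repeat_request : Prop := ∀ (selection : List (List (String × String))), Dom_repeat_request selection → Spec_repeat_request selection (repeat_request selection)

-- ===== LEMMAS AND PROOFS =====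

theorem pvInRequest_eq (request : List (Option String × Option String))
    (s : List (String × String)) :
    pvInRequest request s = if pvReapet s ∈ request then 0 else 1 := by
  induction request with
  | nil => simp [pvInRequest]
  | cons p rest ih =>
      simp only [pvInRequest, List.mem_cons, ih]
      by_cases h : p = pvReapet s
      · subst h; simp [pvReapet]
      · have hb : (p.1 == pvGetA s "position" && p.2 == pvGetA s "mainSkill") = false := by
          rw [Bool.and_eq_false_iff]
          by_cases h1 : p.1 = pvGetA s "position"
          · right
            simp only [beq_eq_false_iff_ne, ne_eq]
            intro h2
            exact h (Prod.ext h1 h2)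
          · left; simp [h1]
        rw [hb]
        simp only [Bool.false_eq_true, if_false]
        have : ¬ (pvReapet s = p) := fun he => h he.symm
        simp [this]

theorem pvLoopA_iff (selection : List (List (String × String)))
    (request : List (Option String × Option String)) :
    pvLoopA request selection = true ↔
      (selection.map pvReapet).Nodup ∧ ∀ p ∈ selection.map pvReapet, p ∉ request := by
  induction selection generalizing request with
  | nil => simp [pvLoopA]
  | cons s rest ih =>
      show (if pvInRequest request s == 0 then false else pvLoopA (request ++ [pvReapet s]) rest) = true ↔ _
      rw [pvInRequest_eq]
      by_cases h : pvReapet s ∈ request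
      · rw [if_pos h, if_pos (by decide : ((0:Int) == 0) = true)]
        constructor
        · intro hfalse; simp at hfalse
        · rintro ⟨-, hall⟩
          exact absurd h (hall (pvReapet s) (by simp))
      · rw [if_neg h, if_neg (by decide : ¬ ((1:Int) == 0) = true)]
        rw [ih]
        constructor
        · rintro ⟨hn, hall⟩
          refine ⟨?_, ?_⟩
          · rw [List.map_cons, List.nodup_cons]
            refine ⟨fun hm => ?_, hn⟩
            have := hall _ hm
            simp at this
          · intro p hp
            rw [List.map_cons, List.mem_cons] at hp
            rcases hp with rfl | hp
            · exact h
            · intro hr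
              have := hall p hp
              simp [hr] at this
        · rintro ⟨hn, hall⟩
          rw [List.map_cons, List.nodup_cons] at hn
          refine ⟨hn.2, fun p hp => ?_⟩
          simp only [List.mem_append, List.mem_singleton]
          push Not
          refine ⟨hall p (by simp [hp]), fun he => hn.1 (he ▸ hp)⟩

theorem pvOfList_sublist {α : Type} [BEq α] [LawfulBEq α] (xs : List α) :
    (PySem.Set.ofList xs).Sublist xs := by
  induction xs with
  | nil => simp [PySem.Set.ofList_nil]
  | cons x xs ih =>
      rw [PySem.Set.ofList_cons]
      exact List.Sublist.cons₂ x (List.Sublist.trans List.filter_sublist ih)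

theorem pvLen_ofList_iff {α : Type} [BEq α] [LawfulBEq α] (xs : List α) :
    (PySem.Set.ofList xs).length = xs.length ↔ xs.Nodup := by
  constructor
  · intro h
    have := (pvOfList_sublist xs).eq_of_length h
    rw [← this]; exact PySem.Set.nodup_ofList xs
  · intro h; rw [PySem.Set.ofList_eq_self_of_nodup xs h]

-- ===== VERDICT (by name: the statement is the Claim_ definition above) =====
theorem repeat_request_spec : Claim_equal_repeat_request := by
  intro selection _
  unfold Spec_repeat_request repeat_request repeat_request_alt
  have hmap : (selection.map (fun s =>
      ((PySem.Dict.mk s).get? "position", (PySem.Dict.mk s).get? "mainSkill")))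
      = selection.map pvReapet := by
    simp [pvReapet, pvGetA]
  rw [hmap]
  by_cases h : (selection.map pvReapet).Nodup
  · have hA : pvLoopA [] selection = true :=
      (pvLoopA_iff selection []).2 ⟨h, by simp⟩
    rw [hA, eq_comm]
    simp only [beq_iff_eq, pvLen_ofList_iff]
    exact h
  · have hA : pvLoopA [] selection = false := by
      rw [← Bool.not_eq_true]
      exact fun hc => h ((pvLoopA_iff selection []).1 hc).1
    rw [hA, eq_comm]
    simp only [beq_eq_false_iff_ne, ne_eq, pvLen_ofList_iff]
    exact h
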